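-- pv_equiv track=rewrite | github.com/jmidvidy/ComputerVision | MorphologicalTranslations/MP2.py | getCellLabel
-- ===== SOURCE A (Python) =====
-- import copy
--
-- def getCellLabel(A, r, c, SE, og, func):
--
--     # use extract rather than found as to enable better debugging
--     # and appply same functin to dilation, erosion, boundry
--
--     extract = []
--     start_row = r - og[0]
--     start_col = c - og[1]
--
--     # extract MASK area from the image
--     sr = copy.deepcopy(start_row)
--     sc = copy.deepcopy(start_col)
--     i = 0
--     while i < len(SE):
--         sc = copy.deepcopy(start_col)
--         j = 0
--         curr = []
--         while j < len(SE[0]):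
--             if (sr < len(A) and sr > -1) and (sc < len(A[0]) and sc > -1):
--                 curr.append(A[sr][sc])
--             else:
--                 curr.append(-1)
--             j += 1
--             sc += 1
--         extract.append(curr)
--         sr += 1
--         i += 1
--
--     # ----- process EROSION or DILATION ------ #
--     # if func is EROSION; 1 for perfect match
--     if func == 'e':
--         for i in range(0, len(SE)):
--             for j in range(0, len(SE[0])):
--                 if SE[i][j] == 1 and extract[i][j] == 1:
--                     continue
--                 else:
--                     return 0
--         return 1
--     # if func is DILATION; 1 for some match
--     else:
--         for i in range(0, len(SE)):
--             for j in range(0, len(SE[0])):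
--                 if SE[i][j] == 1 and extract[i][j] == 1:
--                     return 1
--         return 0
--     return
-- ===== SOURCE B (Python) =====
-- def getCellLabel(A, r, c, SE, og, func):
--     rows, cols = len(A), (len(A[0]) if A else 0)
--     h = len(SE)
--     w = len(SE[0]) if SE else 0
--     hits = 0
--     for j in range(w):              # column-major counting pass
--         sc = c - og[1] + j
--         for i in range(h):
--             sr = r - og[0] + i
--             v = A[sr][sc] if 0 <= sr < rows and 0 <= sc < cols else -1
--             if SE[i][j] == 1 and v == 1:
--                 hits += 1
--     if func == 'e':
--         return 1 if hits == h * w else 0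
--     return 1 if hits > 0 else 0
-- ===== Notes on version B (the rewrite author's own statement) =====
-- stated objective: alternative
-- what changed: Replaces A's build-extract-matrix-then-early-return scans by a single column-major counting pass: B maintains one integer counter of matching SE cells and decides arithmetically (erosion: count == h*w, dilation: count > 0), with no intermediate matrix, no deepcopy and no early exit.
-- outside the precondition, e.g. on getCellLabel([[1]], 0, 0, [[0, 1], [1]], [0, 0], 'e'): A returns 0, B raises IndexError
import Mathlib
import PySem

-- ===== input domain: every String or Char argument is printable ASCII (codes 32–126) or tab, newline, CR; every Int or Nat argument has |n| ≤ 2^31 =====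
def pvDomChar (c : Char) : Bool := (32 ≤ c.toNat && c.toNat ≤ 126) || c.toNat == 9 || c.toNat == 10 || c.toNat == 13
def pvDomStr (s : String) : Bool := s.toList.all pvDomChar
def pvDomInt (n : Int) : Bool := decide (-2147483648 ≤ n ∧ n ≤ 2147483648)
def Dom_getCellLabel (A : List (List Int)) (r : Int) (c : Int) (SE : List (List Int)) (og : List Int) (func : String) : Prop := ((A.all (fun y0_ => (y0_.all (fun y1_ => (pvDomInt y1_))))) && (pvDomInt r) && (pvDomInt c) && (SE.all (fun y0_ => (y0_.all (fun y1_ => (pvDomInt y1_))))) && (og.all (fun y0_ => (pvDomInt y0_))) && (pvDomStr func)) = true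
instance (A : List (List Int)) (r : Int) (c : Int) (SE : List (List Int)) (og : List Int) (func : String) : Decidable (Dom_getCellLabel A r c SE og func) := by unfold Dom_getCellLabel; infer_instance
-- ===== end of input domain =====

-- B replaces A's build-extract-then-early-return scans by one column-major counting pass
-- deciding arithmetically (count == h*w / count > 0); objective: alternative decomposition.

-- ===== PORT A =====
-- A builds `extract` (window values, -1 out of bounds), then scans it against SE;
-- the early `return` of the scans is the all/any of the scanned predicate.
def getCellLabel (A : List (List Int)) (r : Int) (c : Int) (SE : List (List Int)) (og : List Int) (func : String) : Int :=
  let start_row := r - og.getD 0 0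
  let start_col := c - og.getD 1 0
  let extract : List (List Int) :=
    (List.range SE.length).map (fun (i : Nat) =>
      (List.range (SE.headD []).length).map (fun (j : Nat) =>
        let sr := start_row + (i : Int)
        let sc := start_col + (j : Int)
        if 0 ≤ sr ∧ sr < (A.length : Int) ∧ 0 ≤ sc ∧ sc < ((A.headD []).length : Int)
        then (A.getD sr.toNat []).getD sc.toNat (-1) else -1))
  if func == "e" then
    if (List.range SE.length).all (fun i =>
        (List.range (SE.headD []).length).all (fun j =>
          ((SE.getD i []).getD j 0 == 1) && ((extract.getD i []).getD j (-1) == 1)))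
    then 1 else 0
  else
    if (List.range SE.length).any (fun i =>
        (List.range (SE.headD []).length).any (fun j =>
          ((SE.getD i []).getD j 0 == 1) && ((extract.getD i []).getD j (-1) == 1)))
    then 1 else 0

-- ===== PORT B =====
-- single column-major pass maintaining a counter `hits`, arithmetic decision at the end
def getCellLabel_alt (A : List (List Int)) (r : Int) (c : Int) (SE : List (List Int)) (og : List Int) (func : String) : Int :=
  let rows := (A.length : Int)
  let cols := ((A.headD []).length : Int)
  let h := SE.length
  let w := if SE.isEmpty then 0 else (SE.headD []).length
  let hits : Nat :=
    (List.range w).foldl (fun acc (j : Nat) =>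
      (List.range h).foldl (fun acc (i : Nat) =>
        let sr := r - og.getD 0 0 + (i : Int)
        let sc := c - og.getD 1 0 + (j : Int)
        let v : Int := if 0 ≤ sr ∧ sr < rows ∧ 0 ≤ sc ∧ sc < cols
                       then (A.getD sr.toNat []).getD sc.toNat (-1) else -1
        if ((SE.getD i []).getD j 0 == 1) && (v == 1) then acc + 1 else acc) acc) 0
  if func == "e" then (if hits = h * w then 1 else 0)
  else (if 0 < hits then 1 else 0)

-- ===== PRECONDITION & SPEC =====
-- Pre_ excludes inputs on which A's index accesses can raise IndexError: og shorter than 2,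
-- an A-row shorter than A's first row at a window position the extraction actually reads,
-- or a ragged SE; on ragged SE where A's early return still yields a value, B raises
-- IndexError (B reads every SE cell), so those inputs are excluded.
def Pre_getCellLabel (A : List (List Int)) (r : Int) (c : Int) (SE : List (List Int)) (og : List Int) (func : String) : Prop :=
  2 ≤ og.length ∧ (∀ row ∈ SE, (SE.headD []).length ≤ row.length) ∧
  ((List.range SE.length).all (fun (i : Nat) =>
    (List.range (SE.headD []).length).all (fun (j : Nat) =>
      let sr := r - og.getD 0 0 + (i : Int)
      let sc := c - og.getD 1 0 + (j : Int)
      !(decide (0 ≤ sr) && decide (sr < (A.length : Int)) &&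
        decide (0 ≤ sc) && decide (sc < ((A.headD []).length : Int))) ||
      decide (sc.toNat < (A.getD sr.toNat []).length))) = true)
instance (A : List (List Int)) (r : Int) (c : Int) (SE : List (List Int)) (og : List Int) (func : String) : Decidable (Pre_getCellLabel A r c SE og func) := by unfold Pre_getCellLabel; infer_instance

def pvWitness_getCellLabel : List (List Int) × Int × Int × List (List Int) × List Int × String :=
  ([[1, 1], [0, 1]], 1, 1, [[1, 1]], [0, 0], "e")

def Spec_getCellLabel (A : List (List Int)) (r : Int) (c : Int) (SE : List (List Int)) (og : List Int) (func : String) (out : Int) : Prop := out = getCellLabel_alt A r c SE og func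
instance (A : List (List Int)) (r : Int) (c : Int) (SE : List (List Int)) (og : List Int) (func : String) (out : Int) : Decidable (Spec_getCellLabel A r c SE og func out) := by unfold Spec_getCellLabel; infer_instance

-- ===== CLAIM (what is proved, stated in full; the proofs are below) =====
def Claim_equal_getCellLabel : Prop := ∀ (A : List (List Int)) (r : Int) (c : Int) (SE : List (List Int)) (og : List Int) (func : String), Dom_getCellLabel A r c SE og func → Pre_getCellLabel A r c SE og func → Spec_getCellLabel A r c SE og func (getCellLabel A r c SE og func)

-- ===== LEMMAS AND PROOFS =====

-- a foldl that conditionally increments is countP shifted by the seed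
theorem pv_foldl_count {α : Type} (p : α → Bool) (l : List α) (n : Nat) :
    l.foldl (fun acc x => if p x then acc + 1 else acc) n = n + l.countP p := by
  induction l generalizing n with
  | nil => simp
  | cons a t ih => by_cases h : p a <;> simp [h, ih, List.countP_cons] <;> omega

theorem pv_getD_map_range {α : Type} (f : Nat → α) (n i : Nat) (h : i < n) (d : α) :
    ((List.range n).map f).getD i d = f i := by
  rw [List.getD_eq_getElem?_getD]
  simp [h]

-- the fused predicate of B equals A's scan of extract, cell by cell
theorem pv_cell_eq (A : List (List Int)) (r c : Int) (SE : List (List Int)) (og : List Int)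
    (i j : Nat) (hi : i < SE.length) (hj : j < (SE.headD []).length) :
    (((List.range SE.length).map (fun (i : Nat) =>
      (List.range (SE.headD []).length).map (fun (j : Nat) =>
        let sr := r - og.getD 0 0 + (i : Int)
        let sc := c - og.getD 1 0 + (j : Int)
        if 0 ≤ sr ∧ sr < (A.length : Int) ∧ 0 ≤ sc ∧ sc < ((A.headD []).length : Int)
        then (A.getD sr.toNat []).getD sc.toNat (-1) else -1))).getD i []).getD j (-1)
    = (let sr := r - og.getD 0 0 + (i : Int)
       let sc := c - og.getD 1 0 + (j : Int)
       if 0 ≤ sr ∧ sr < (A.length : Int) ∧ 0 ≤ sc ∧ sc < ((A.headD []).length : Int)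
       then (A.getD sr.toNat []).getD sc.toNat (-1) else -1) := by
  rw [pv_getD_map_range _ _ _ hi, pv_getD_map_range _ _ _ hj]

-- positivity of countP as existence (not in this Mathlib under that name)
theorem pv_countP_pos {α : Type} (p : α → Bool) (l : List α) :
    0 < l.countP p ↔ ∃ a ∈ l, p a = true := by
  induction l with
  | nil => simp
  | cons a t ih =>
    rw [List.countP_cons]
    by_cases h : p a = true
    · simp [h]
    · simp [h, ih]

-- B's double counting foldl equals countP over the flattened (j,i) cell list
theorem pv_hits_eq_countP (h w : Nat) (p : Nat × Nat → Bool) :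
    (List.range w).foldl (fun acc j =>
      (List.range h).foldl (fun acc i => if p (i, j) then acc + 1 else acc) acc) 0
    = ((List.range w).flatMap (fun j => (List.range h).map (fun i => (i, j)))).countP p := by
  have step : ∀ (l : List Nat) (n : Nat),
      l.foldl (fun acc j =>
        (List.range h).foldl (fun acc i => if p (i, j) then acc + 1 else acc) acc) n
      = n + (l.flatMap (fun j => (List.range h).map (fun i => (i, j)))).countP p := by
    intro l
    induction l with
    | nil => simp
    | cons a t ih =>
      intro n
      rw [List.foldl_cons, pv_foldl_count, ih, List.flatMap_cons, List.countP_append,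
        List.countP_map]
      simp only [Function.comp_def]
      omega
  simpa using step (List.range w) 0

-- ===== VERDICT (by name: the statement is the Claim_ definition above) =====
theorem getCellLabel_spec : Claim_equal_getCellLabel := by
  intro A r c SE og func _hDom _hPre
  simp only [Spec_getCellLabel, getCellLabel, getCellLabel_alt]
  set h := SE.length with hh
  have hw : (if SE.isEmpty then 0 else (SE.headD []).length) = (SE.headD []).length := by
    cases SE <;> simp
  rw [hw]
  set w := (SE.headD []).length with hwd
  set p : Nat × Nat → Bool := fun q =>
    ((SE.getD q.1 []).getD q.2 0 == 1) &&
    ((if 0 ≤ r - og.getD 0 0 + (q.1 : Int) ∧ r - og.getD 0 0 + (q.1 : Int) < (A.length : Int) ∧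
         0 ≤ c - og.getD 1 0 + (q.2 : Int) ∧ c - og.getD 1 0 + (q.2 : Int) < ((A.headD []).length : Int)
      then (A.getD (r - og.getD 0 0 + (q.1 : Int)).toNat []).getD (c - og.getD 1 0 + (q.2 : Int)).toNat (-1)
      else -1) == 1) with hp
  have hhits : (List.range w).foldl (fun acc j =>
      (List.range h).foldl (fun acc i => if p (i, j) then acc + 1 else acc) acc) 0
      = ((List.range w).flatMap (fun j => (List.range h).map (fun i => (i, j)))).countP p :=
    pv_hits_eq_countP h w p
  set cells := (List.range w).flatMap (fun j => (List.range h).map (fun i => (i, j))) with hcells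
  have hlen : cells.length = h * w := by
    simp [hcells, Function.comp_def, Nat.mul_comm]
  have hmem : ∀ q : Nat × Nat, q ∈ cells ↔ q.1 < h ∧ q.2 < w := by
    intro q
    simp only [hcells, List.mem_flatMap, List.mem_map, List.mem_range]
    constructor
    · rintro ⟨j, hj, i, hi, rfl⟩; exact ⟨hi, hj⟩
    · rintro ⟨h1, h2⟩; exact ⟨q.2, h2, q.1, h1, rfl⟩
  -- A's nested all / any as quantifiers over cells
  have hallA : ((List.range h).all (fun i => (List.range w).all (fun j =>
        ((SE.getD i []).getD j 0 == 1) &&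
        ((((List.range h).map (fun (i : Nat) => (List.range w).map (fun (j : Nat) =>
            let sr := r - og.getD 0 0 + (i : Int)
            let sc := c - og.getD 1 0 + (j : Int)
            if 0 ≤ sr ∧ sr < (A.length : Int) ∧ 0 ≤ sc ∧ sc < ((A.headD []).length : Int)
            then (A.getD sr.toNat []).getD sc.toNat (-1) else -1))).getD i []).getD j (-1) == 1))) = true)
      ↔ ∀ q ∈ cells, p q = true := by
    simp only [List.all_eq_true, List.mem_range]
    constructor
    · intro hq q hqc
      obtain ⟨h1, h2⟩ := (hmem q).mp hqc
      have := hq q.1 h1 q.2 h2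
      rwa [pv_cell_eq A r c SE og q.1 q.2 h1 h2] at this
    · intro hq i hi j hj
      have := hq (i, j) ((hmem (i, j)).mpr ⟨hi, hj⟩)
      rw [pv_cell_eq A r c SE og i j hi hj]
      exact this
  have hanyA : ((List.range h).any (fun i => (List.range w).any (fun j =>
        ((SE.getD i []).getD j 0 == 1) &&
        ((((List.range h).map (fun (i : Nat) => (List.range w).map (fun (j : Nat) =>
            let sr := r - og.getD 0 0 + (i : Int)
            let sc := c - og.getD 1 0 + (j : Int)
            if 0 ≤ sr ∧ sr < (A.length : Int) ∧ 0 ≤ sc ∧ sc < ((A.headD []).length : Int)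
            then (A.getD sr.toNat []).getD sc.toNat (-1) else -1))).getD i []).getD j (-1) == 1))) = true)
      ↔ ∃ q ∈ cells, p q = true := by
    simp only [List.any_eq_true, List.mem_range]
    constructor
    · rintro ⟨i, hi, j, hj, hq⟩
      rw [pv_cell_eq A r c SE og i j hi hj] at hq
      exact ⟨(i, j), (hmem (i, j)).mpr ⟨hi, hj⟩, hq⟩
    · rintro ⟨q, hqc, hq⟩
      obtain ⟨h1, h2⟩ := (hmem q).mp hqc
      refine ⟨q.1, h1, q.2, h2, ?_⟩
      rwa [pv_cell_eq A r c SE og q.1 q.2 h1 h2]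
  rw [hhits]
  by_cases hf : func == "e"
  · simp only [hf, if_true]
    by_cases hA : ∀ q ∈ cells, p q = true
    · rw [if_pos (hallA.mpr hA), if_pos]
      rw [← hlen]; exact List.countP_eq_length.mpr hA
    · rw [if_neg (fun hc => hA (hallA.mp hc)), if_neg]
      intro hc
      exact hA ((List.countP_eq_length.mp (by rw [hc, hlen])))
  · simp only [hf, Bool.false_eq_true, if_false]
    by_cases hA : ∃ q ∈ cells, p q = true
    · rw [if_pos (hanyA.mpr hA), if_pos ((pv_countP_pos p cells).mpr hA)]
    · have hc : ¬ 0 < cells.countP p := fun hc => hA ((pv_countP_pos p cells).mp hc)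
      rw [if_neg (fun hq => hA (hanyA.mp hq)), if_neg hc]
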